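-- pv_equiv track=rewrite | github.com/jcolinpatrick/kryptos | scripts/grille/blitz_grille_geometry_v6.py | keyword_col_perm
-- ===== SOURCE A (Python) =====
-- def is_valid(sigma, n=97):
--     return len(sigma) == n and len(set(sigma)) == n and all(0 <= x < n for x in sigma)
--
-- def keyword_col_perm(kw, alpha, width=None):
--     """Columnar transposition using keyword to define column reading order."""
--     if width is None:
--         width = len(kw)
--     # Rank-order columns by keyword letter in alpha
--     col_order = sorted(range(width), key=lambda i: (alpha.index(kw[i % len(kw)]), i))
--     n = 97
--     n_rows = (n + width - 1) // width
--     sigma = []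
--     for col in col_order:
--         for row in range(n_rows):
--             pos = row * width + col
--             if pos < n:
--                 sigma.append(pos)
--     return sigma if is_valid(sigma) else None
-- ===== SOURCE B (Python) =====
-- def is_valid(sigma, n=97):
--     return len(sigma) == n and len(set(sigma)) == n and all(0 <= x < n for x in sigma)
--
-- def keyword_col_perm(kw, alpha, width=None):
--     """Columnar transposition: sort the positions 0..96 directly by (rank of their column, position)."""
--     if width is None:
--         width = len(kw)
--     col_order = sorted(range(width), key=lambda i: (alpha.index(kw[i % len(kw)]), i))
--     if width <= 0:
--         return None
--     rank = {col: r for r, col in enumerate(col_order)}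
--     sigma = sorted(range(97), key=lambda p: (rank[p % width], p))
--     return sigma if is_valid(sigma) else None
-- ===== Notes on version B (the rewrite author's own statement) =====
-- stated objective: alternative
-- what changed: Instead of generating sigma column by column with a nested row loop, B inverts the viewpoint: it builds a rank dictionary from col_order and sorts the 97 positions directly by the key (rank[p % width], p), so sigma is produced by one key-based sort over positions rather than by column-wise generation.
import Mathlib
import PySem

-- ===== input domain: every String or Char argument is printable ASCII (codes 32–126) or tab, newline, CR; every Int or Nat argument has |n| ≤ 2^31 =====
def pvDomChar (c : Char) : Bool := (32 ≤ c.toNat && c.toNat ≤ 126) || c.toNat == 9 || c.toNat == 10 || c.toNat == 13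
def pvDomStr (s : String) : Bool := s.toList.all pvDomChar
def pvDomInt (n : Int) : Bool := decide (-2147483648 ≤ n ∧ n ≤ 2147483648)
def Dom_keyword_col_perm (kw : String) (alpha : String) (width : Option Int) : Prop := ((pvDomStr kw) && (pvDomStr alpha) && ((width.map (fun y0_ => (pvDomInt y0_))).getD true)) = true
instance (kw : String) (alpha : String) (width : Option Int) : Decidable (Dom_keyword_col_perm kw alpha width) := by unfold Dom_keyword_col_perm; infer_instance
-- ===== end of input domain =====

-- B replaces A's column-by-column generation (nested row loop, pos = row*width+col with a
-- bounds check) by a rank dictionary over col_order and ONE key-based sort of the 97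
-- positions by (rank of p's column, p): an alternative algorithm, not claimed faster.

-- ===== PORT A =====
-- is_valid(sigma): module-level helper shared by both Pythons
def pvIsValid (sigma : List Int) : Bool :=
  decide (sigma.length = 97) && decide ((PySem.Set.ofList sigma).length = 97) &&
    sigma.all (fun x => decide (0 ≤ x) && decide (x < 97))

-- col_order = sorted(range(width), key=lambda i: (alpha.index(kw[i % len(kw)]), i))
-- (this line is shared verbatim by both Pythons).  alpha.index is ported as Str.find, and
-- kw[i % len(kw)] via pyGet?/getD: exact under Pre_ (which excludes the ValueError of .index
-- on a missing char and the ZeroDivisionError of i % 0 on an empty keyword).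
def pvColOrder (kw alpha : String) (w : Int) : List Int :=
  PySem.List.sorted2 (PySem.List.pyRange 0 w 1)
    (fun i => PySem.Str.find alpha (String.singleton (((PySem.Str.pyGet? kw (PySem.Int.mod i (kw.length : Int)))).getD ' ')))
    (fun i => i) false

def keyword_col_perm (kw : String) (alpha : String) (width : Option Int) : Option (List Int) :=
  let w := width.getD (kw.length : Int)
  let colOrder := pvColOrder kw alpha w
  let nRows := PySem.Int.floordiv (97 + w - 1) w
  let sigma := colOrder.foldl (fun acc col =>
    (PySem.List.pyRange 0 nRows 1).foldl (fun acc2 row =>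
      if row * w + col < 97 then acc2 ++ [row * w + col] else acc2) acc) []
  if pvIsValid sigma then some sigma else none

-- ===== PORT B =====
-- rank = {col: r for r, col in enumerate(col_order)}
def pvRank (colOrder : List Int) : PySem.Dict Int Int :=
  (PySem.List.enumerate colOrder 0).foldl (fun d p => d.insert p.2 p.1) PySem.Dict.empty

def keyword_col_perm_alt (kw : String) (alpha : String) (width : Option Int) : Option (List Int) :=
  let w := width.getD (kw.length : Int)
  let colOrder := pvColOrder kw alpha w
  if w ≤ 0 then none
  else
    let rank := pvRank colOrder
    -- rank[p % width]: p % width always is a key (0 ≤ p % width < width and col_order is a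
    -- permutation of range(width)), so the KeyError branch is unreachable and getD is exact
    let sigma := PySem.List.sorted2 (PySem.List.pyRange 0 97 1)
      (fun p => rank.getD (PySem.Int.mod p w) 0) (fun p => p) false
    if pvIsValid sigma then some sigma else none

-- ===== PRECONDITION & SPEC =====
-- Pre_ excludes exactly the inputs where A raises: effective width 0 (ZeroDivisionError in
-- (97+width-1)//width or in i % len(kw)), an empty keyword with positive width
-- (ZeroDivisionError in i % len(kw)), and a used keyword char absent from alpha (ValueError
-- of alpha.index); the used chars are the first min(width, len(kw)) chars of kw.
def Pre_keyword_col_perm (kw : String) (alpha : String) (width : Option Int) : Prop :=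
  width.getD (kw.length : Int) ≠ 0 ∧ (0 < width.getD (kw.length : Int) →
    kw.toList ≠ [] ∧ (kw.toList.take (width.getD (kw.length : Int)).toNat).all
      (fun c => alpha.toList.contains c) = true)
instance (kw : String) (alpha : String) (width : Option Int) : Decidable (Pre_keyword_col_perm kw alpha width) := by unfold Pre_keyword_col_perm; infer_instance
def pvWitness_keyword_col_perm : String × String × Option Int := ("ab", "bca", none)

def Spec_keyword_col_perm (kw : String) (alpha : String) (width : Option Int) (out : Option (List Int)) : Prop := out = keyword_col_perm_alt kw alpha width
instance (kw : String) (alpha : String) (width : Option Int) (out : Option (List Int)) : Decidable (Spec_keyword_col_perm kw alpha width out) := by unfold Spec_keyword_col_perm; infer_instance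

-- ===== CLAIM (what is proved, stated in full; the proofs are below) =====
def Claim_equal_keyword_col_perm : Prop := ∀ (kw : String) (alpha : String) (width : Option Int), Dom_keyword_col_perm kw alpha width → Pre_keyword_col_perm kw alpha width → Spec_keyword_col_perm kw alpha width (keyword_col_perm kw alpha width)

-- ===== LEMMAS AND PROOFS =====

-- the per-column list both sides produce: the positions < 97 congruent to c mod w, ascending
def pvColumn (w c : Int) : List Int :=
  (PySem.List.pyRange 0 97 1).filter (fun p => decide (PySem.Int.mod p w = c))

theorem pv_mem_column {w c p : Int} (h : p ∈ pvColumn w c) :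
    (0 ≤ p ∧ p < 97) ∧ PySem.Int.mod p w = c := by
  simpa [pvColumn, List.mem_filter, PySem.List.mem_pyRange_one] using h

-- the two descriptions of a column agree: A's direct enumeration = the mod-w filter
theorem pv_col_lists (w c : Int) (hw : 0 < w) (h0 : 0 ≤ c) (hc : c < w) :
    ((PySem.List.pyRange 0 (PySem.Int.floordiv (97 + w - 1) w) 1).filter
        (fun row => decide (row * w + c < 97))).map (fun row => row * w + c)
    = pvColumn w c := by
  have hmodw : ∀ p : Int, PySem.Int.mod p w = p % w := fun p => PySem.Int.mod_eq_emod_of_pos hw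
  apply List.eq_of_perm_of_sorted (le := fun a b : Int => a < b)
    (fun a b _ _ h1 h2 => absurd h2 (not_lt.mpr h1.le))
  · exact List.pairwise_map.mpr (((PySem.List.pairwise_lt_pyRange_one _ _).filter _).imp
      (fun h => by linarith [mul_lt_mul_of_pos_right h hw]))
  · exact (PySem.List.pairwise_lt_pyRange_one _ _).filter _
  · rw [List.perm_ext_iff_of_nodup]
    · intro x
      simp only [List.mem_map, List.mem_filter, PySem.List.mem_pyRange_one, pvColumn,
        decide_eq_true_eq, hmodw]
      constructor
      · rintro ⟨row, ⟨⟨hr0, _⟩, hlt⟩, rfl⟩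
        refine ⟨⟨by positivity, hlt⟩, ?_⟩
        have h1 : (c + w * row) % w = c % w := Int.add_mul_emod_self_left c w row
        have h2 : c % w = c := Int.emod_eq_of_lt h0 hc
        have h3 : row * w + c = c + w * row := by ring
        rw [h3, h1, h2]
      · rintro ⟨⟨hx0, hx97⟩, hm⟩
        refine ⟨x / w, ⟨⟨Int.ediv_nonneg hx0 hw.le, ?_⟩, ?_⟩, ?_⟩
        · rw [show (97 : Int) + w - 1 = 96 + w by ring, PySem.Int.floordiv_eq_ediv_of_pos hw]
          have h1 : x / w ≤ 96 / w := Int.ediv_le_ediv hw (by omega)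
          have h2 : (96 + w) / w = 96 / w + 1 := by
            simpa using Int.add_mul_ediv_right 96 1 (ne_of_gt hw)
          omega
        · have := Int.ediv_add_emod x w
          rw [hm] at this; rw [mul_comm]; omega
        · have := Int.ediv_add_emod x w
          rw [hm] at this; rw [mul_comm]; omega
    · exact (List.pairwise_map.mpr (((PySem.List.pairwise_lt_pyRange_one _ _).filter _).imp
        (fun h => by linarith [mul_lt_mul_of_pos_right h hw]))).imp ne_of_lt
    · exact ((PySem.List.pairwise_lt_pyRange_one _ _).filter _).imp ne_of_lt

-- A's inner row loop produces pvColumn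
theorem pv_inner_eq (w c : Int) (hw : 0 < w) (h0 : 0 ≤ c) (hc : c < w) (acc : List Int) :
    (PySem.List.pyRange 0 (PySem.Int.floordiv (97 + w - 1) w) 1).foldl (fun acc2 row =>
      if row * w + c < 97 then acc2 ++ [row * w + c] else acc2) acc
    = acc ++ pvColumn w c := by
  have h := PySem.List.foldl_append_if (fun row : Int => decide (row * w + c < 97))
    (fun row : Int => row * w + c)
    (PySem.List.pyRange 0 (PySem.Int.floordiv (97 + w - 1) w) 1) acc
  simp only [decide_eq_true_eq] at h
  rw [h, pv_col_lists w c hw h0 hc]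

-- insertBy only looks at 'before x y' for y in the list: congruence
theorem pv_insertBy_congr {α : Type} (b1 b2 : α → α → Bool) (x : α) (ys : List α)
    (h : ∀ y ∈ ys, b1 x y = b2 x y) :
    PySem.List.insertBy b1 x ys = PySem.List.insertBy b2 x ys := by
  induction ys with
  | nil => rfl
  | cons y ys ih =>
    simp only [PySem.List.insertBy]
    rw [h y (by simp), ih (fun z hz => h z (by simp [hz]))]

-- a fold of insertBy with two before-functions agreeing on all pairs drawn from S
theorem pv_foldl_insertBy_congr {α : Type} (b1 b2 : α → α → Bool) (S : List α)
    (h : ∀ a ∈ S, ∀ b ∈ S, b1 a b = b2 a b) :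
    ∀ (l acc : List α), (∀ x ∈ l, x ∈ S) → (∀ x ∈ acc, x ∈ S) →
      l.foldl (fun acc x => PySem.List.insertBy b1 x acc) acc
        = l.foldl (fun acc x => PySem.List.insertBy b2 x acc) acc := by
  intro l
  induction l with
  | nil => intro acc _ _; rfl
  | cons x xs ih =>
    intro acc hl hacc
    simp only [List.foldl_cons]
    rw [pv_insertBy_congr b1 b2 x acc (fun y hy => h x (hl x (by simp)) y (hacc y hy))]
    exact ih _ (fun z hz => hl z (by simp [hz]))
      (fun z hz => by
        rcases (PySem.List.mem_insertBy b2 x z acc).mp hz with rfl | hz'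
        · exact hl z (by simp)
        · exact hacc z hz')

-- sorted2 with an Int first key and the identity tie-break equals sorted with the
-- flattened key k·97 + p, on lists of ints in [0, 97)
theorem pv_sorted2_eq_sorted (xs : List Int) (k : Int → Int)
    (hb : ∀ x ∈ xs, 0 ≤ x ∧ x < 97) :
    PySem.List.sorted2 xs k (fun p => p) false
      = PySem.List.sorted xs (fun p => k p * 97 + p) false := by
  simp only [PySem.List.sorted2, PySem.List.sorted, if_neg (by decide : ¬ (false = true))]
  refine pv_foldl_insertBy_congr _ _ xs ?_ xs [] (fun x hx => hx) (by simp)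
  intro a ha b hb'
  obtain ⟨ha0, ha97⟩ := hb a ha
  obtain ⟨hb0, hb97⟩ := hb b hb'
  rw [Bool.eq_iff_iff]
  simp only [Bool.or_eq_true, Bool.and_eq_true, Bool.not_eq_true', decide_eq_true_eq,
    decide_eq_false_iff_not]
  omega

-- the rank dict of a nodup list: items, keys, and lookups
theorem pv_rank_items (l : List Int) (hnd : l.Nodup) :
    (pvRank l).items = (PySem.List.enumerate l 0).map (fun p => (p.2, p.1)) := by
  have h := PySem.Dict.items_foldl_insert_fresh (PySem.List.enumerate l 0)
    (fun p => p.2) (fun p => p.1) PySem.Dict.empty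
    (fun a _ => by simp [PySem.Dict.contains_empty])
    (by rw [PySem.List.map_snd_enumerate]; exact hnd)
  simpa [pvRank] using h

theorem pv_rank_keys_nodup (l : List Int) (hnd : l.Nodup) : (pvRank l).keys.Nodup := by
  have : (pvRank l).keys = l := by
    simp only [PySem.Dict.keys, pv_rank_items l hnd, List.map_map]
    exact PySem.List.map_snd_enumerate l 0
  rw [this]; exact hnd

theorem pv_rank_getD (l : List Int) (hnd : l.Nodup) {i c : Int}
    (h : (i, c) ∈ PySem.List.enumerate l 0) : (pvRank l).getD c 0 = i := by
  refine PySem.Dict.getD_of_mem_items (pvRank l) ?_ (pv_rank_keys_nodup l hnd) 0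
  rw [pv_rank_items l hnd]
  exact List.mem_map.mpr ⟨(i, c), h, rfl⟩

-- ranks are strictly increasing along the list itself
theorem pv_rank_pairwise (l : List Int) (hnd : l.Nodup) :
    l.Pairwise (fun c1 c2 => (pvRank l).getD c1 0 < (pvRank l).getD c2 0) := by
  have h2 : (PySem.List.enumerate l 0).Pairwise
      (fun p q => (pvRank l).getD p.2 0 < (pvRank l).getD q.2 0) := by
    refine (PySem.List.pairwise_lt_enumerate l 0).imp_of_mem ?_
    intro p q hp hq hlt
    rw [pv_rank_getD l hnd (by simpa using hp), pv_rank_getD l hnd (by simpa using hq)]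
    exact hlt
  have h3 : ((PySem.List.enumerate l 0).map (fun p => p.2)).Pairwise
      (fun c1 c2 => (pvRank l).getD c1 0 < (pvRank l).getD c2 0) := List.pairwise_map.mpr h2
  rwa [PySem.List.map_snd_enumerate] at h3

-- sum of an indicator map over a nodup list containing the index
theorem pv_sum_ite (t : Nat) (x0 : Int) :
    ∀ (l : List Int), l.Nodup → x0 ∈ l →
      (l.map (fun c => if x0 = c then t else 0)).sum = t := by
  intro l
  induction l with
  | nil => intro _ h; cases h
  | cons c cs ih =>
    intro hnd hmem
    rcases List.mem_cons.mp hmem with rfl | hmem'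
    · have hz : ∀ y ∈ cs.map (fun c => if x0 = c then t else 0), y = 0 := by
        intro y hy
        rcases List.mem_map.mp hy with ⟨c', hc', rfl⟩
        have hne : x0 ≠ c' := fun h => (List.nodup_cons.mp hnd).1 (h ▸ hc')
        simp [hne]
      simp [List.sum_eq_zero hz]
    · have hne : x0 ≠ c := fun h => (List.nodup_cons.mp hnd).1 (h ▸ hmem')
      simp [hne, ih (List.nodup_cons.mp hnd).2 hmem']

-- the columns of range(width) partition range(97)
theorem pv_flatMap_perm (w : Int) (hw : 0 < w) (l : List Int)
    (hperm : l.Perm (PySem.List.pyRange 0 w 1)) :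
    (l.flatMap (pvColumn w)).Perm (PySem.List.pyRange 0 97 1) := by
  refine (List.Perm.flatMap_right (pvColumn w) hperm).trans ?_
  have hmodw : ∀ p : Int, PySem.Int.mod p w = p % w := fun p => PySem.Int.mod_eq_emod_of_pos hw
  have hnd97 : (PySem.List.pyRange 0 97 1).Nodup :=
    (PySem.List.pairwise_lt_pyRange_one _ _).imp ne_of_lt
  have hndw : (PySem.List.pyRange 0 w 1).Nodup :=
    (PySem.List.pairwise_lt_pyRange_one _ _).imp ne_of_lt
  rw [List.perm_iff_count]
  intro x
  rw [List.count_flatMap]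
  by_cases hx : x ∈ PySem.List.pyRange 0 97 1
  · have hpt : (List.count x ∘ pvColumn w) = fun c => if x % w = c then 1 else 0 := by
      funext c
      by_cases hc : x % w = c
      · simp only [Function.comp_apply, pvColumn, if_pos hc]
        rw [List.count_filter (by simp [hmodw, hc]), List.count_eq_one_of_mem hnd97 hx]
      · simp only [Function.comp_apply, pvColumn, if_neg hc]
        exact List.count_eq_zero.mpr (fun hmem => hc (by simpa [hmodw] using (pv_mem_column hmem).2))
    rw [hpt, List.count_eq_one_of_mem hnd97 hx]
    exact pv_sum_ite 1 (x % w) _ hndw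
      (PySem.List.mem_pyRange_one.mpr ⟨Int.emod_nonneg x (ne_of_gt hw), Int.emod_lt_of_pos x hw⟩)
  · rw [List.count_eq_zero.mpr hx]
    refine List.sum_eq_zero ?_
    intro y hy
    rcases List.mem_map.mp hy with ⟨c, _, rfl⟩
    exact List.count_eq_zero.mpr (fun hmem => hx (by
      rcases pv_mem_column hmem with ⟨⟨h1, h2⟩, _⟩
      exact PySem.List.mem_pyRange_one.mpr ⟨h1, h2⟩))

-- ===== VERDICT =====
theorem keyword_col_perm_spec : Claim_equal_keyword_col_perm := by
  intro kw alpha width _ hpre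
  simp only [Pre_keyword_col_perm] at hpre
  obtain ⟨hw0, -⟩ := hpre
  unfold Spec_keyword_col_perm
  simp only [keyword_col_perm, keyword_col_perm_alt]
  set w := width.getD (kw.length : Int) with hwdef
  rcases lt_or_gt_of_ne hw0 with hneg | hposw
  · -- width < 0: col_order is empty, sigma = [] fails is_valid, both return none
    have hco : pvColOrder kw alpha w = [] := by
      unfold pvColOrder
      rw [PySem.List.pyRange_one_eq_nil (le_of_lt hneg)]
      exact (PySem.List.sorted2_perm _ _ _ _).eq_nil
    simp only [hco, List.foldl_nil]
    rw [if_neg (by simp [pvIsValid]), if_pos (le_of_lt hneg)]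
  · -- width > 0: A's sigma is the concatenation of the columns in keyword order, and B's
    -- sort by (rank, position) produces exactly that strictly (rank,p)-increasing list
    rw [if_neg (not_le.mpr hposw)]
    set colOrder := pvColOrder kw alpha w with hcodef
    have hperm : colOrder.Perm (PySem.List.pyRange 0 w 1) := PySem.List.sorted2_perm _ _ _ _
    have hnd : colOrder.Nodup :=
      hperm.nodup_iff.mpr ((PySem.List.pairwise_lt_pyRange_one _ _).imp ne_of_lt)
    have hmem : ∀ col ∈ colOrder, 0 ≤ col ∧ col < w := by
      intro col hcol
      exact PySem.List.mem_pyRange_one.mp (hperm.subset hcol)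
    -- A's sigma = flatMap of the columns
    have hA : colOrder.foldl (fun acc col =>
        (PySem.List.pyRange 0 (PySem.Int.floordiv (97 + w - 1) w) 1).foldl (fun acc2 row =>
          if row * w + col < 97 then acc2 ++ [row * w + col] else acc2) acc) []
        = colOrder.flatMap (pvColumn w) := by
      rw [PySem.List.foldl_congr_mem colOrder _ (fun acc col => acc ++ pvColumn w col) []
        (fun acc col hcol => pv_inner_eq w col hposw (hmem col hcol).1 (hmem col hcol).2 acc)]
      simpa using PySem.List.foldl_append_eq_flatMap (pvColumn w) colOrder []
    -- B's sigma = sorted by the flattened key = the same flatMap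
    have hB : PySem.List.sorted2 (PySem.List.pyRange 0 97 1)
        (fun p => (pvRank colOrder).getD (PySem.Int.mod p w) 0) (fun p => p) false
        = colOrder.flatMap (pvColumn w) := by
      rw [pv_sorted2_eq_sorted _ _ (fun x hx => PySem.List.mem_pyRange_one.mp hx)]
      refine PySem.List.sorted_eq_of_perm_of_pairwise_lt _ _ _
        (pv_flatMap_perm w hposw colOrder hperm) ?_
      rw [List.pairwise_flatMap]
      constructor
      · intro c _
        refine ((PySem.List.pairwise_lt_pyRange_one _ _).filter _).imp_of_mem ?_
        intro p q hp hq hlt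
        rw [(pv_mem_column hp).2, (pv_mem_column hq).2]
        omega
      · refine (pv_rank_pairwise colOrder hnd).imp ?_
        intro c1 c2 hlt x hx y hy
        rcases pv_mem_column hx with ⟨⟨_, hx97⟩, hxc⟩
        rcases pv_mem_column hy with ⟨⟨hy0, _⟩, hyc⟩
        rw [hxc, hyc]
        omega
    rw [hA, hB]
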